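-- pv_equiv track=rewrite | github.com/bilal-rachik/seqnet_cond | sqlnet/sqlnet/model/sqlnet_cond.py | generate_gt_where_seq
-- ===== SOURCE A (Python) =====
-- def generate_gt_where_seq(q, query):
--     ret_seq = []
--
--     for cur_q,cur_query in zip(q,query):
--         cur_values = []
--
--         st = cur_query.index(u'WHERE')+1 if \
--                 u'WHERE' in cur_query else len(cur_query)
--         all_toks = ['<BEG>'] + cur_q + ['<END>']
--         while st < len(cur_query):
--             ed = len(cur_query) if 'AND' not in cur_query[st:]\
--                     else cur_query[st:].index('AND') + st
--             if 'EQL' in cur_query[st:ed]: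
--                 op = cur_query[st:ed].index('EQL') + st
--             elif 'GT' in cur_query[st:ed]:
--                 op = cur_query[st:ed].index('GT') + st
--             elif 'LT' in cur_query[st:ed]:
--                 op = cur_query[st:ed].index('LT') + st
--             else:
--                 raise RuntimeError("No operator in it!")
--             this_str = ['<BEG>'] + cur_query[op+1:ed] + ['<END>']
--             cur_seq = [all_toks.index(s) if s in all_toks \
--                     else 0 for s in this_str]
--             cur_values.append(cur_seq)
--             st = ed+1
--         ret_seq.append(cur_values)
--     return ret_seq
-- ===== SOURCE B (Python) =====
-- def generate_gt_where_seq(q, query):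
--     ret_seq = []
--     for cur_q, cur_query in zip(q, query):
--         # first-occurrence token -> index map, built once
--         pos = {}
--         for i, t in enumerate(['<BEG>'] + cur_q + ['<END>']):
--             if t not in pos:
--                 pos[t] = i
--         tail = cur_query[cur_query.index('WHERE') + 1:] if 'WHERE' in cur_query else []
--         # partition the tail into condition segments on 'AND' delimiters;
--         # a trailing empty segment (terminal 'AND') is not emitted
--         segs = []
--         cur = []
--         for t in tail:
--             if t == 'AND':
--                 segs.append(cur)
--                 cur = []
--             else:
--                 cur.append(t)
--         if tail and tail[-1] != 'AND':
--             segs.append(cur)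
--         cur_values = []
--         for seg in segs:
--             for opname in ('EQL', 'GT', 'LT'):
--                 if opname in seg:
--                     k = seg.index(opname)
--                     break
--             else:
--                 raise RuntimeError("No operator in it!")
--             cur_values.append([pos.get(s, 0)
--                                for s in ['<BEG>'] + seg[k + 1:] + ['<END>']])
--         ret_seq.append(cur_values)
--     return ret_seq
-- ===== Notes on version B (the rewrite author's own statement) =====
-- stated objective: alternative
-- what changed: B replaces A's index-arithmetic while loop over slice/.index scans by an explicit partition of the WHERE-tail into 'AND'-separated segments plus a token-to-first-index dictionary built once per query and a first-match scan over the operator tuple; Pre_ excludes exactly the inputs where A raises RuntimeError (a non-trailing 'AND'-segment without EQL/GT/LT), where B raises the same error.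
import Mathlib
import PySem

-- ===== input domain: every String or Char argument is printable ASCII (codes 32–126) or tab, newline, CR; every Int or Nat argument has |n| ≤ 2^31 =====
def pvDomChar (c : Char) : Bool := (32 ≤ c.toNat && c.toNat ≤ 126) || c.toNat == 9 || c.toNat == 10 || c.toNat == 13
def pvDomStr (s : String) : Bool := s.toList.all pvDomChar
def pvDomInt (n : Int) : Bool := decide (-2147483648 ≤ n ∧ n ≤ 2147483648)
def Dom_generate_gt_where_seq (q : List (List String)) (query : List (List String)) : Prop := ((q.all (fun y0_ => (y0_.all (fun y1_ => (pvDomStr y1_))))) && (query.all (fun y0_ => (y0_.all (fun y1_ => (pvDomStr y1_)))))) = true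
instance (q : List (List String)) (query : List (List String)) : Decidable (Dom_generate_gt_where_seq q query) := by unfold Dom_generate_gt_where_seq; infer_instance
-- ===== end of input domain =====

-- B replaces A's index-arithmetic while loop by an explicit partition of the WHERE-tail into
-- 'AND'-separated segments plus a token→first-index dictionary built once (objective: alternative).
-- Both programs raise RuntimeError when a processed segment has no operator; Pre_ excludes exactly those inputs.

-- ===== PORT A =====
-- A's while loop over the start index st; '.index' is only called under an 'in' guard,
-- so List.idxOf (first index, = length if absent, never hit here) is its exact value.
def aLoop (cur_query all_toks : List String) (st : Nat) : List (List Int) :=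
  if _h : st < cur_query.length then
    let ed : Nat := if "AND" ∈ cur_query.drop st then (cur_query.drop st).idxOf "AND" + st
                    else cur_query.length
    let seg := (cur_query.drop st).take (ed - st)      -- cur_query[st:ed]
    let op? : Option Nat :=
      if "EQL" ∈ seg then some (seg.idxOf "EQL" + st)
      else if "GT" ∈ seg then some (seg.idxOf "GT" + st)
      else if "LT" ∈ seg then some (seg.idxOf "LT" + st)
      else none                                        -- raise RuntimeError: outside Pre_
    match op? with
    | none => []
    | some op =>
        let this_str := ["<BEG>"] ++ (cur_query.drop (op + 1)).take (ed - (op + 1)) ++ ["<END>"]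
        let cur_seq := this_str.map (fun s => if s ∈ all_toks then ((all_toks.idxOf s : Int)) else 0)
        cur_seq :: aLoop cur_query all_toks (ed + 1)
  else []
termination_by cur_query.length - st
decreasing_by
  split <;> omega

def generate_gt_where_seq (q : List (List String)) (query : List (List String)) : List (List (List Int)) :=
  (q.zip query).foldl
    (fun ret_seq p =>
      ret_seq ++ [aLoop p.2 (["<BEG>"] ++ p.1 ++ ["<END>"])
        (if "WHERE" ∈ p.2 then p.2.idxOf "WHERE" + 1 else p.2.length)])
    []

-- ===== PORT B =====
-- token -> first index, built once per pair ('if t not in pos: pos[t] = i')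
def bPos (all_toks : List String) : PySem.Dict String Int :=
  (PySem.List.enumerate all_toks 0).foldl
    (fun pos it => if pos.contains it.2 then pos else pos.insert it.2 it.1)
    PySem.Dict.empty

-- the 'for t in tail' split loop with accumulators segs, cur
def bSegLoop (segs : List (List String)) (cur : List String) : List String → List (List String) × List String
  | [] => (segs, cur)
  | t :: rest =>
      if t = "AND" then bSegLoop (segs ++ [cur]) [] rest
      else bSegLoop segs (cur ++ [t]) rest

def bSegs (tail : List String) : List (List String) :=
  let r := bSegLoop [] [] tail
  if tail ≠ [] ∧ tail.getLast? ≠ some "AND" then r.1 ++ [r.2] else r.1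

-- 'for opname in ('EQL','GT','LT'): if opname in seg: break / else: raise'
def bFindOp (seg : List String) : Option String :=
  ["EQL", "GT", "LT"].find? (fun opname => decide (opname ∈ seg))

def bCond (pos : PySem.Dict String Int) (seg : List String) : List Int :=
  match bFindOp seg with
  | some opname =>
      let k := seg.idxOf opname
      (["<BEG>"] ++ seg.drop (k + 1) ++ ["<END>"]).map (fun s => pos.getD s 0)
  | none => []                                          -- raise RuntimeError: outside Pre_

def generate_gt_where_seq_alt (q : List (List String)) (query : List (List String)) : List (List (List Int)) :=
  (q.zip query).map (fun p =>
    (bSegs (if "WHERE" ∈ p.2 then p.2.drop (p.2.idxOf "WHERE" + 1) else [])).map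
      (bCond (bPos (["<BEG>"] ++ p.1 ++ ["<END>"]))))

-- ===== PRECONDITION & SPEC =====
-- Pre_ excludes exactly the inputs on which A raises RuntimeError("No operator in it!"):
-- some 'AND'-separated segment after 'WHERE' other than a trailing empty one contains none of EQL/GT/LT.
def hasOpB (seg : List String) : Bool := seg.contains "EQL" || seg.contains "GT" || seg.contains "LT"

def segsOkB : List (List String) → Bool
  | [] => true
  | [s] => hasOpB s || s.isEmpty
  | s :: rest => hasOpB s && segsOkB rest

def Pre_generate_gt_where_seq (q : List (List String)) (query : List (List String)) : Prop :=
  ∀ p ∈ q.zip query,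
    segsOkB ((if "WHERE" ∈ p.2 then p.2.drop (p.2.idxOf "WHERE" + 1) else []).splitOn "AND") = true

instance (q : List (List String)) (query : List (List String)) : Decidable (Pre_generate_gt_where_seq q query) := by
  unfold Pre_generate_gt_where_seq; infer_instance

def pvWitness_generate_gt_where_seq : List (List String) × List (List String) :=
  ([["what", "is", "the", "name"]],
   [["SELECT", "col0", "WHERE", "col1", "EQL", "the", "name", "AND", "col2", "GT", "what"]])

def Spec_generate_gt_where_seq (q : List (List String)) (query : List (List String)) (out : List (List (List Int))) : Prop := out = generate_gt_where_seq_alt q query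
instance (q : List (List String)) (query : List (List String)) (out : List (List (List Int))) : Decidable (Spec_generate_gt_where_seq q query out) := by unfold Spec_generate_gt_where_seq; infer_instance

-- ===== CLAIM (what is proved, stated in full; the proofs are below) =====
def Claim_equal_generate_gt_where_seq : Prop := ∀ (q : List (List String)) (query : List (List String)), Dom_generate_gt_where_seq q query → Pre_generate_gt_where_seq q query → Spec_generate_gt_where_seq q query (generate_gt_where_seq q query)

-- ===== LEMMAS AND PROOFS =====

-- segment length: the cut position of the first segment of t (first 'AND', or all of t)
def kOf (t : List String) : Nat := if "AND" ∈ t then t.idxOf "AND" else t.length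

theorem posAux (xs : List String) (s : String) :
    ∀ (i0 : Int) (d : PySem.Dict String Int),
      (((PySem.List.enumerate xs i0).foldl
          (fun pos it => if pos.contains it.2 then pos else pos.insert it.2 it.1) d).get? s) =
        if (d.get? s).isSome then d.get? s
        else if s ∈ xs then some (i0 + (xs.idxOf s : Int)) else none := by
  induction xs with
  | nil =>
      intro i0 d
      cases hd : d.get? s <;> simp [PySem.List.enumerate_nil, hd]
  | cons x xs ih =>
      intro i0 d
      rw [PySem.List.enumerate_cons]
      simp only [List.foldl_cons, ih]
      by_cases hc : d.contains x = true
      · simp only [if_pos hc]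
        by_cases hsx : s = x
        · subst hsx
          rw [PySem.Dict.contains_eq_isSome_get?] at hc
          simp [hc]
        · have hidx : List.idxOf s (x :: xs) = (List.idxOf s xs).succ :=
            List.idxOf_cons_ne _ (fun h => hsx h.symm)
          by_cases hmem : s ∈ xs
          · simp only [List.mem_cons, hmem, or_true, if_true, hidx]
            split
            · rfl
            · congr 1; push_cast; ring
          · simp [hmem, hsx]
      · simp only [if_neg hc]
        by_cases hsx : s = x
        · subst hsx
          rw [PySem.Dict.contains_eq_isSome_get?] at hc
          simp only [Bool.not_eq_true, Option.isSome_eq_false_iff, Option.isNone_iff_eq_none] at hc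
          simp [PySem.Dict.get?_insert_self, hc, List.idxOf_cons_self]
        · rw [PySem.Dict.get?_insert_of_ne _ _ hsx]
          have hidx : List.idxOf s (x :: xs) = (List.idxOf s xs).succ :=
            List.idxOf_cons_ne _ (fun h => hsx h.symm)
          by_cases hmem : s ∈ xs
          · simp only [List.mem_cons, hmem, or_true, if_true, hidx]
            split
            · rfl
            · congr 1; push_cast; ring
          · simp [hmem, hsx]

theorem pos_getD (xs : List String) (s : String) :
    (bPos xs).getD s 0 = if s ∈ xs then ((xs.idxOf s : Int)) else 0 := by
  rw [PySem.Dict.getD_eq_get?_getD, bPos, posAux]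
  by_cases hmem : s ∈ xs <;> simp [hmem, PySem.Dict.get?_empty]

theorem segLoop_acc (ts : List String) :
    ∀ (acc : List (List String)) (cur : List String),
      bSegLoop acc cur ts = (acc ++ (bSegLoop [] cur ts).1, (bSegLoop [] cur ts).2) := by
  induction ts with
  | nil => intro acc cur; simp [bSegLoop]
  | cons t rest ih =>
      intro acc cur
      by_cases ht : t = "AND"
      · simp only [bSegLoop, if_pos ht]
        rw [ih (acc ++ [cur]), ih ([] ++ [cur])]
        simp
      · simp only [bSegLoop, if_neg ht]
        exact ih acc (cur ++ [t])

theorem segLoop_split (ts : List String) :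
    ∀ cur, bSegLoop [] cur ts =
      if "AND" ∈ ts then
        ((cur ++ ts.take (ts.idxOf "AND")) :: (bSegLoop [] [] (ts.drop (ts.idxOf "AND" + 1))).1,
          (bSegLoop [] [] (ts.drop (ts.idxOf "AND" + 1))).2)
      else ([], cur ++ ts) := by
  induction ts with
  | nil => intro cur; simp [bSegLoop]
  | cons t rest ih =>
      intro cur
      by_cases ht : t = "AND"
      · subst ht
        simp only [bSegLoop, if_pos]
        rw [segLoop_acc]
        simp [List.idxOf_cons_self]
  -- first 'AND' is at the head: segment is cur itself
      · have hmm : ("AND" ∈ t :: rest) ↔ ("AND" ∈ rest) := by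
          simp only [List.mem_cons, or_iff_right_iff_imp]
          intro h; exact absurd (Eq.symm h) ht
        have hidx : ("AND" ∈ rest) → List.idxOf "AND" (t :: rest) = (List.idxOf "AND" rest).succ :=
          fun _ => List.idxOf_cons_ne _ ht
        simp only [bSegLoop, if_neg ht]
        rw [ih (cur ++ [t])]
        by_cases hin : "AND" ∈ rest
        · simp only [hmm, hin, if_pos, hidx hin, Nat.succ_eq_add_one]
          simp [List.take_succ_cons, List.drop_succ_cons]
        · simp [hmm, hin]

theorem bSegs_cons (t : List String) (hne : t ≠ []) :
    bSegs t = t.take (kOf t) :: bSegs (t.drop (kOf t + 1)) := by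
  by_cases hA : "AND" ∈ t
  · have hk : kOf t = t.idxOf "AND" := if_pos hA
    have hklt : t.idxOf "AND" < t.length := List.idxOf_lt_length_of_mem hA
    rw [hk]
    by_cases hr : t.drop (t.idxOf "AND" + 1) = []
    · -- terminal 'AND': the trailing empty segment is not emitted on either side
      have hlen : t.length = t.idxOf "AND" + 1 := by
        have := List.length_drop (l := t) (i := t.idxOf "AND" + 1)
        rw [hr] at this
        simp at this
        omega
      have hlast : t.getLast? = some "AND" := by
        rw [List.getLast?_eq_getElem?, hlen]
        simp only [Nat.add_sub_cancel]
        rw [List.getElem?_eq_getElem hklt]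
        exact congrArg some (List.getElem_idxOf hklt)
      have hcond : ¬ (t ≠ [] ∧ t.getLast? ≠ some "AND") := fun h => h.2 hlast
      rw [hr]
      simp only [bSegs]
      rw [if_neg hcond, segLoop_split, if_pos hA, hr]
      simp [bSegLoop]
    · -- the tail continues: the last token of t is the last token of the rest
      have hlast : t.getLast? = (t.drop (t.idxOf "AND" + 1)).getLast? := by
        conv_lhs => rw [← List.take_append_drop (t.idxOf "AND" + 1) t]
        rw [List.getLast?_append]
        cases hg : (t.drop (t.idxOf "AND" + 1)).getLast? with
        | none => exact absurd (List.getLast?_eq_none_iff.mp hg) hr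
        | some a => simp
      simp only [bSegs, hlast]
      rw [segLoop_split, if_pos hA]
      by_cases hc2 : (t.drop (t.idxOf "AND" + 1)).getLast? = some "AND"
      · rw [if_neg (fun h => h.2 hc2), if_neg (fun h => h.2 hc2)]
        simp
      · rw [if_pos ⟨hne, hc2⟩, if_pos ⟨hr, hc2⟩]
        simp
  · have hk : kOf t = t.length := if_neg hA
    have hlast : t.getLast? ≠ some "AND" := fun h => hA (List.mem_of_getLast? h)
    have hdrop : t.drop (kOf t + 1) = [] := by
      rw [hk]; exact List.drop_eq_nil_of_le (Nat.le_succ _)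
    rw [hdrop, hk]
    simp only [bSegs]
    rw [if_pos ⟨hne, hlast⟩, segLoop_split, if_neg hA]
    simp [bSegLoop, List.take_length]

theorem splitOn_and (t : List String) :
    t.splitOn "AND" =
      if "AND" ∈ t then t.take (t.idxOf "AND") :: (t.drop (t.idxOf "AND" + 1)).splitOn "AND"
      else [t] := by
  induction t with
  | nil => simp [List.splitOn_nil]
  | cons a t ih =>
      show List.splitOnP _ _ = _
      rw [List.splitOnP_cons]
      by_cases ha : a = "AND"
      · subst ha
        simp [List.idxOf_cons_self, List.splitOn]
      · have hbeq : (a == "AND") = false := by simp [ha]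
        have hmm : ("AND" ∈ a :: t) ↔ ("AND" ∈ t) := by
          simp only [List.mem_cons, or_iff_right_iff_imp]
          intro h; exact absurd (Eq.symm h) ha
        rw [if_neg (by simp [hbeq])]
        by_cases hin : "AND" ∈ t
        · have hidx : List.idxOf "AND" (a :: t) = (List.idxOf "AND" t).succ :=
            List.idxOf_cons_ne _ ha
          rw [if_pos (hmm.mpr hin)]
          have := ih
          rw [if_pos hin] at this
          rw [show t.splitOn "AND" = List.splitOnP (fun x => x == "AND") t from rfl] at this
          rw [this]
          simp [hidx, List.take_succ_cons, List.drop_succ_cons]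
        · rw [if_neg (fun h => hin (hmm.mp h))]
          have := ih
          rw [if_neg hin] at this
          rw [show t.splitOn "AND" = List.splitOnP (fun x => x == "AND") t from rfl] at this
          rw [this]
          rfl

theorem segsOkB_cons {s : List String} {rest : List (List String)} (h : rest ≠ []) :
    segsOkB (s :: rest) = (hasOpB s && segsOkB rest) := by
  cases rest with
  | nil => exact absurd rfl h
  | cons r rs => rfl

theorem ok_head (t : List String) (hne : t ≠ [])
    (hok : segsOkB (t.splitOn "AND") = true) : hasOpB (t.take (kOf t)) = true := by
  rw [splitOn_and] at hok
  by_cases hA : "AND" ∈ t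
  · rw [if_pos hA] at hok
    have hnn : List.splitOn "AND" (t.drop (t.idxOf "AND" + 1)) ≠ [] :=
      List.splitOnP_ne_nil _ _
    rw [segsOkB_cons hnn] at hok
    rw [kOf, if_pos hA]
    exact ((Bool.and_eq_true _ _).mp hok).1
  · rw [if_neg hA] at hok
    rw [kOf, if_neg hA, List.take_length]
    simp only [segsOkB, Bool.or_eq_true, List.isEmpty_iff] at hok
    rcases hok with h | h
    · exact h
    · exact absurd h hne

theorem ok_rest (t : List String)
    (hok : segsOkB (t.splitOn "AND") = true) :
    segsOkB ((t.drop (kOf t + 1)).splitOn "AND") = true := by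
  by_cases hA : "AND" ∈ t
  · rw [splitOn_and t, if_pos hA] at hok
    have hnn : List.splitOn "AND" (t.drop (t.idxOf "AND" + 1)) ≠ [] :=
      List.splitOnP_ne_nil _ _
    rw [segsOkB_cons hnn] at hok
    rw [kOf, if_pos hA]
    exact ((Bool.and_eq_true _ _).mp hok).2
  · rw [kOf, if_neg hA, List.drop_eq_nil_of_le (by omega), List.splitOn_nil]
    rfl

theorem bCond_eq (all_toks seg : List String) (opname : String)
    (hfind : bFindOp seg = some opname) :
    bCond (bPos all_toks) seg =
      (["<BEG>"] ++ seg.drop (seg.idxOf opname + 1) ++ ["<END>"]).map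
        (fun s => if s ∈ all_toks then ((all_toks.idxOf s : Int)) else 0) := by
  rw [bCond, hfind]
  refine List.map_congr_left (fun s _ => ?_)
  rw [pos_getD]

theorem loop_eq (all_toks : List String) :
    ∀ (n : Nat) (cur_query : List String) (st : Nat),
      cur_query.length - st ≤ n →
      segsOkB ((cur_query.drop st).splitOn "AND") = true →
      aLoop cur_query all_toks st = (bSegs (cur_query.drop st)).map (bCond (bPos all_toks)) := by
  intro n
  induction n with
  | zero =>
      intro cq st hlen hok
      rw [aLoop, dif_neg (by omega), List.drop_eq_nil_of_le (by omega)]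
      rfl
  | succ n ih =>
      intro cq st hlen hok
      by_cases hst : st < cq.length
      · have htne : cq.drop st ≠ [] := by
          intro h
          have := List.drop_eq_nil_iff.mp h
          omega
        have hkle : kOf (cq.drop st) ≤ (cq.drop st).length := by
          rw [kOf]
          split_ifs with h
          · exact Nat.le_of_lt (List.idxOf_lt_length_of_mem h)
          · exact Nat.le_refl _
        have hed : (if "AND" ∈ cq.drop st then (cq.drop st).idxOf "AND" + st else cq.length) =
            kOf (cq.drop st) + st := by
          rw [kOf]
          split_ifs with h
          · rfl
          · have := List.length_drop (l := cq) (i := st)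
            omega
        have hseglen : (List.take (kOf (cq.drop st)) (cq.drop st)).length = kOf (cq.drop st) := by
          rw [List.length_take]
          omega
        have hop := ok_head (cq.drop st) htne hok
        have hrest :  cq.drop (kOf (cq.drop st) + st + 1) = (cq.drop st).drop (kOf (cq.drop st) + 1) := by
          rw [List.drop_drop]
          congr 1
          omega
        have hihlen : cq.length - (kOf (cq.drop st) + st + 1) ≤ n := by omega
        have hih := ih cq (kOf (cq.drop st) + st + 1) hihlen
          (by rw [hrest]; exact ok_rest (cq.drop st) hok)
        rw [hrest] at hih
        rw [aLoop, dif_pos hst]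
        simp only [hed, Nat.add_sub_cancel]
        rw [bSegs_cons _ htne, List.map_cons]
        by_cases hEQL : "EQL" ∈ List.take (kOf (cq.drop st)) (cq.drop st)
        · simp only [if_pos hEQL]
          have hfind : bFindOp (List.take (kOf (cq.drop st)) (cq.drop st)) = some "EQL" := by
            simp [bFindOp, List.find?, hEQL]
          congr 1
          -- the tail goal is closed by `congr` from hih; the head remains
          rw [bCond_eq _ _ "EQL" hfind]
          have hd : List.drop (List.idxOf "EQL" (List.take (kOf (cq.drop st)) (cq.drop st)) + st + 1) cq =
              List.drop (List.idxOf "EQL" (List.take (kOf (cq.drop st)) (cq.drop st)) + 1) (List.drop st cq) := by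
            rw [List.drop_drop]
            congr 1
            omega
          have harith : kOf (cq.drop st) + st -
                (List.idxOf "EQL" (List.take (kOf (cq.drop st)) (cq.drop st)) + st + 1) =
              kOf (cq.drop st) -
                (List.idxOf "EQL" (List.take (kOf (cq.drop st)) (cq.drop st)) + 1) := by
            omega
          rw [hd, harith, List.drop_take]
        · by_cases hGT : "GT" ∈ List.take (kOf (cq.drop st)) (cq.drop st)
          · simp only [if_neg hEQL, if_pos hGT]
            have hfind : bFindOp (List.take (kOf (cq.drop st)) (cq.drop st)) = some "GT" := by
              simp [bFindOp, List.find?, hEQL, hGT]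
            congr 1
            rw [bCond_eq _ _ "GT" hfind]
            have hd : List.drop (List.idxOf "GT" (List.take (kOf (cq.drop st)) (cq.drop st)) + st + 1) cq =
                List.drop (List.idxOf "GT" (List.take (kOf (cq.drop st)) (cq.drop st)) + 1) (List.drop st cq) := by
              rw [List.drop_drop]
              congr 1
              omega
            have harith : kOf (cq.drop st) + st -
                  (List.idxOf "GT" (List.take (kOf (cq.drop st)) (cq.drop st)) + st + 1) =
                kOf (cq.drop st) -
                  (List.idxOf "GT" (List.take (kOf (cq.drop st)) (cq.drop st)) + 1) := by
              omega
            rw [hd, harith, List.drop_take]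
          · have hLT : "LT" ∈ List.take (kOf (cq.drop st)) (cq.drop st) := by
              simp only [hasOpB, Bool.or_eq_true, List.contains_eq_mem, decide_eq_true_eq] at hop
              rcases hop with (h | h) | h
              · exact absurd h hEQL
              · exact absurd h hGT
              · exact h
            simp only [if_neg hEQL, if_neg hGT, if_pos hLT]
            have hfind : bFindOp (List.take (kOf (cq.drop st)) (cq.drop st)) = some "LT" := by
              simp [bFindOp, List.find?, hEQL, hGT, hLT]
            congr 1
            rw [bCond_eq _ _ "LT" hfind]
            have hd : List.drop (List.idxOf "LT" (List.take (kOf (cq.drop st)) (cq.drop st)) + st + 1) cq =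
                List.drop (List.idxOf "LT" (List.take (kOf (cq.drop st)) (cq.drop st)) + 1) (List.drop st cq) := by
              rw [List.drop_drop]
              congr 1
              omega
            have harith : kOf (cq.drop st) + st -
                  (List.idxOf "LT" (List.take (kOf (cq.drop st)) (cq.drop st)) + st + 1) =
                kOf (cq.drop st) -
                  (List.idxOf "LT" (List.take (kOf (cq.drop st)) (cq.drop st)) + 1) := by
              omega
            rw [hd, harith, List.drop_take]
      · rw [aLoop, dif_neg hst, List.drop_eq_nil_of_le (by omega)]
        rfl

-- ===== VERDICT (by name: the statement is the Claim_ definition above) =====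
theorem generate_gt_where_seq_spec : Claim_equal_generate_gt_where_seq := by
  intro q query _hdom hpre
  unfold Spec_generate_gt_where_seq generate_gt_where_seq generate_gt_where_seq_alt
  rw [PySem.List.foldl_append_singleton_eq_map, List.nil_append]
  refine List.map_congr_left (fun p hp => ?_)
  have hpp := hpre p hp
  by_cases hw : "WHERE" ∈ p.2
  · rw [if_pos hw] at hpp ⊢
    rw [if_pos hw]
    exact loop_eq _ p.2.length p.2 _ (Nat.sub_le _ _) hpp
  · rw [if_neg hw] at hpp ⊢
    rw [if_neg hw]
    have h := loop_eq (["<BEG>"] ++ p.1 ++ ["<END>"]) p.2.length p.2 p.2.length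
      (by omega) (by rw [List.drop_length]; exact hpp)
    rw [List.drop_length] at h
    exact h
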